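-- pv_equiv track=rewrite | github.com/wimb0/home-assistant-nextenergy-battery-modbus | custom_components/nextenergy_battery/util.py | parse_bitfield_messages
-- ===== SOURCE A (Python) =====
-- from typing import Dict
--
-- def parse_bitfield_messages(value: int | None, message_map: Dict[int, str]) -> str:
--     """Parse a bitfield value and return a comma-separated string of messages."""
--     if value is None or value == 0:
--         return "OK"
--
--     active_messages = []
--     # Loop through all 16 possible bits
--     for bit in range(16):
--         # Check if the bit is active in the value
--         if (value >> bit) & 1:
--             # If we have a known message for this bit, add it
--             if bit in message_map:
--                 active_messages.append(message_map[bit])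
--             # Otherwise, report the unknown active bit
--             else:
--                 active_messages.append(f"Reserved bit {bit}")
--
--     if not active_messages:
--         # This case should technically not be reached if value is not 0, but as a fallback
--         return "Unknown State"
--
--     return ", ".join(active_messages)
-- ===== SOURCE B (Python) =====
-- def parse_bitfield_messages(value, message_map):
--     """Parse a bitfield value and return a comma-separated string of messages."""
--     if value is None or value == 0:
--         return "OK"
--     v = value & 0xFFFF
--     parts = []
--     while v:
--         b = v & -v                      # lowest set bit
--         idx = b.bit_length() - 1
--         parts.append(message_map.get(idx, f"Reserved bit {idx}"))
--         v ^= b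
--     if not parts:
--         return "Unknown State"
--     return ", ".join(parts)
-- ===== Notes on version B (the rewrite author's own statement) =====
-- stated objective: alternative
-- what changed: Instead of scanning all 16 bit positions, B masks to 16 bits and iterates only over the set bits (lowest-bit extraction v & -v, index via bit_length), emitting messages in the same ascending order.
import Mathlib
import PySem

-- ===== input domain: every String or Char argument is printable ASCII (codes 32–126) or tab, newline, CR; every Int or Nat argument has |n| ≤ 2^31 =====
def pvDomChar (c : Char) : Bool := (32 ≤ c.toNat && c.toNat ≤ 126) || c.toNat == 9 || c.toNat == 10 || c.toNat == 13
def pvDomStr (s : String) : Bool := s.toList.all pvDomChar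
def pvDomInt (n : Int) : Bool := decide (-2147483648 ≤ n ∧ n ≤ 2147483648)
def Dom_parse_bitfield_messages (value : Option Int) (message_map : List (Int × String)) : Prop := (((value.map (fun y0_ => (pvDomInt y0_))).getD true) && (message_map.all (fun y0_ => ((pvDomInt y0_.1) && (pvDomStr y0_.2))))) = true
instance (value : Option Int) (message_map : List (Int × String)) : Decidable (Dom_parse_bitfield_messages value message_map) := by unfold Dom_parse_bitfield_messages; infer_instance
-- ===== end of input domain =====

-- B iterates over the SET bits of the 16-bit mask (lowest-bit extraction) instead of
-- scanning all 16 positions; same messages, same ascending order.  Objective: alternative.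

-- ===== PORT A =====
-- literal transliteration of A: scan bits 0..15, test (value >> bit) & 1, append message or reserved text
def parse_bitfield_messages (value : Option Int) (message_map : List (Int × String)) : String :=
  match value with
  | none => "OK"                                   -- value is None
  | some v =>
    if v = 0 then "OK"
    else
      let d := PySem.Dict.mk message_map
      let active := (PySem.List.pyRange 0 16 1).foldl (fun acc bit =>
        if PySem.Int.band (v >>> ((bit.toNat : Int))) 1 ≠ 0 then   -- (value >> bit) & 1 (bit ≥ 0, so .toNat is exact)
          match d.get? bit with                          -- 'bit in message_map' / 'message_map[bit]'
          | some s => acc ++ [s]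
          | none   => acc ++ ["Reserved bit " ++ PySem.Int.toStr bit]
        else acc) []
      if active = [] then "Unknown State"
      else PySem.Str.join ", " active

-- ===== PORT B =====
-- termination fact for B's while-loop: clearing the lowest set bit decreases v
theorem pv_odd_land (k : Nat) : (2*k+1) &&& (2*k) = 2*k := by
  apply Nat.eq_of_testBit_eq
  intro i
  cases i with
  | zero =>
    have e1 : (2*k+1) % 2 = 1 := by omega
    have e2 : (2*k) % 2 = 0 := by omega
    simp [Nat.testBit_zero, e1, e2]
  | succ i =>
    have h1 : (2*k+1)/2 = k := by omega
    have h2 : (2*k)/2 = k := by omega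
    rw [Nat.testBit_land]
    simp only [Nat.testBit_succ]
    rw [h1, h2]
    simp

theorem pv_even_land (j : Nat) : (2*j+2) &&& (2*j+1) = 2*((j+1) &&& j) := by
  apply Nat.eq_of_testBit_eq
  intro i
  cases i with
  | zero =>
    have e1 : (2*j+2) % 2 = 0 := by omega
    have e2 : (2*((j+1) &&& j)) % 2 = 0 := by omega
    simp [Nat.testBit_zero, e1, e2]
  | succ i =>
    have h1 : (2*j+2)/2 = j+1 := by omega
    have h2 : (2*j+1)/2 = j := by omega
    have h3 : (2*((j+1) &&& j))/2 = (j+1) &&& j := by omega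
    rw [Nat.testBit_land]
    simp only [Nat.testBit_succ]
    rw [h1, h2, h3, Nat.testBit_land]

theorem pv_land_pred_lt (n : Nat) (h : n ≠ 0) : n &&& (n-1) < n := by
  induction n using Nat.strong_induction_on with
  | _ n ih =>
    obtain h2 | h2 : n % 2 = 1 ∨ n % 2 = 0 := by omega
    · have hn : n = 2*(n/2)+1 := by omega
      rw [hn, show 2*(n/2)+1-1 = 2*(n/2) by omega, pv_odd_land]
      omega
    · obtain ⟨j, hj⟩ : ∃ j, n/2 = j+1 := ⟨n/2-1, by omega⟩
      have hn : n = 2*j+2 := by omega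
      rw [hn, show 2*j+2-1 = 2*j+1 by omega, pv_even_land]
      have := ih (j+1) (by omega) (by omega)
      rw [show j+1-1 = j by omega] at this
      omega

-- literal transliteration of B: mask to 16 bits, then loop over set bits lowest-first.
-- 'v & -v' (lowest set bit of a positive int) is computed as v ^^^ (v &&& (v-1)), and
-- 'b.bit_length() - 1' of that power of two as Nat.log2 b; both exact for v > 0.
def pvLoopB (message_map : List (Int × String)) (v : Nat) : List String :=
  if h : v = 0 then []
  else
    let b := v ^^^ (v &&& (v - 1))        -- b = v & -v
    let idx := Nat.log2 b                 -- idx = b.bit_length() - 1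
    ((PySem.Dict.mk message_map).getD (idx : Int)
        ("Reserved bit " ++ PySem.Int.toStr (idx : Int)))   -- message_map.get(idx, f"Reserved bit {idx}")
      :: pvLoopB message_map (v &&& (v - 1))                -- v ^= b, continue
  termination_by v
  decreasing_by exact pv_land_pred_lt v h

def parse_bitfield_messages_alt (value : Option Int) (message_map : List (Int × String)) : String :=
  match value with
  | none => "OK"
  | some x =>
    if x = 0 then "OK"
    else
      let v := PySem.Int.band x 65535       -- v = value & 0xFFFF
      let parts := pvLoopB message_map v.toNat   -- v ≥ 0 after the mask, so the Nat loop is exact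
      if parts = [] then "Unknown State"
      else PySem.Str.join ", " parts

-- ===== PRECONDITION & SPEC =====
def Spec_parse_bitfield_messages (value : Option Int) (message_map : List (Int × String)) (out : String) : Prop := out = parse_bitfield_messages_alt value message_map
instance (value : Option Int) (message_map : List (Int × String)) (out : String) : Decidable (Spec_parse_bitfield_messages value message_map out) := by unfold Spec_parse_bitfield_messages; infer_instance

-- ===== CLAIM (what is proved, stated in full; the proofs are below) =====
def Claim_equal_parse_bitfield_messages : Prop := ∀ (value : Option Int) (message_map : List (Int × String)), Dom_parse_bitfield_messages value message_map → Spec_parse_bitfield_messages value message_map (parse_bitfield_messages value message_map)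

-- ===== LEMMAS AND PROOFS =====

-- the index stream of B's loop, separated from the message lookup
def pvIdxList (v : Nat) : List Nat :=
  if h : v = 0 then []
  else Nat.log2 (v ^^^ (v &&& (v - 1))) :: pvIdxList (v &&& (v - 1))
  termination_by v
  decreasing_by exact pv_land_pred_lt v h

def pvMsgF (message_map : List (Int × String)) (j : Nat) : String :=
  (PySem.Dict.mk message_map).getD (j : Int) ("Reserved bit " ++ PySem.Int.toStr (j : Int))

theorem pv_loop_eq_map_idx (mm : List (Int × String)) (v : Nat) :
    pvLoopB mm v = (pvIdxList v).map (pvMsgF mm) := by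
  induction v using Nat.strong_induction_on with
  | _ v ih =>
    by_cases h : v = 0
    · subst h; rw [pvLoopB, pvIdxList]; simp
    · rw [pvLoopB, pvIdxList]
      simp only [h, dif_neg, not_false_iff, List.map_cons, List.cons.injEq]
      exact ⟨rfl, ih _ (pv_land_pred_lt v h)⟩

theorem pv_two_mul_xor (a b : Nat) : (2*a) ^^^ (2*b) = 2*(a ^^^ b) := by
  apply Nat.eq_of_testBit_eq
  intro i
  cases i with
  | zero =>
    have e1 : (2*a) % 2 = 0 := by omega
    have e2 : (2*b) % 2 = 0 := by omega
    have e3 : (2*(a ^^^ b)) % 2 = 0 := by omega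
    simp [Nat.testBit_zero, e1, e3]
  | succ i =>
    have h1 : (2*a)/2 = a := by omega
    have h2 : (2*b)/2 = b := by omega
    have h3 : (2*(a ^^^ b))/2 = a ^^^ b := by omega
    rw [Nat.testBit_xor]
    simp only [Nat.testBit_succ]
    rw [h1, h2, h3, Nat.testBit_xor]

theorem pv_succ_xor (a : Nat) : (2*a+1) ^^^ (2*a) = 1 := by
  apply Nat.eq_of_testBit_eq
  intro i
  cases i with
  | zero =>
    have e1 : (2*a+1) % 2 = 1 := by omega
    have e2 : (2*a) % 2 = 0 := by omega
    simp [Nat.testBit_zero, e1]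
  | succ i =>
    have h1 : (2*a+1)/2 = a := by omega
    have h2 : (2*a)/2 = a := by omega
    have h3 : (1:Nat)/2 = 0 := by omega
    rw [Nat.testBit_xor]
    simp only [Nat.testBit_succ, h3]
    rw [h1, h2]
    simp [Nat.zero_testBit]

theorem pv_b_pos (n : Nat) (h : n ≠ 0) : n ^^^ (n &&& (n-1)) ≠ 0 := by
  induction n using Nat.strong_induction_on with
  | _ n ih =>
    obtain h2 | h2 : n % 2 = 1 ∨ n % 2 = 0 := by omega
    · have hn : n = 2*(n/2)+1 := by omega
      rw [hn, show 2*(n/2)+1-1 = 2*(n/2) by omega, pv_odd_land, pv_succ_xor]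
      omega
    · obtain ⟨j, hj⟩ : ∃ j, n/2 = j+1 := ⟨n/2-1, by omega⟩
      have hn : n = 2*j+2 := by omega
      rw [hn, show 2*j+2-1 = 2*j+1 by omega, pv_even_land,
          show (2*j+2) = 2*(j+1) by omega, pv_two_mul_xor]
      have := ih (j+1) (by omega) (by omega)
      rw [show j+1-1 = j by omega] at this
      omega

theorem pv_idx_even (m : Nat) : pvIdxList (2*m) = (pvIdxList m).map (· + 1) := by
  induction m using Nat.strong_induction_on with
  | _ m ih =>
    by_cases h : m = 0
    · subst h; rw [show 2*0 = 0 by omega, pvIdxList]; simp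
    · obtain ⟨j, hj⟩ : ∃ j, m = j+1 := ⟨m-1, by omega⟩
      have hstep : ∀ v : Nat, v ≠ 0 →
          pvIdxList v = Nat.log2 (v ^^^ (v &&& (v-1))) :: pvIdxList (v &&& (v-1)) := by
        intro v hv; rw [pvIdxList]; simp [hv]
      rw [hstep (2*m) (by omega), hstep m h]
      have hland : (2*m) &&& (2*m-1) = 2*(m &&& (m-1)) := by
        rw [hj, show 2*(j+1) = 2*j+2 by omega, show 2*j+2-1 = 2*j+1 by omega, pv_even_land,
            show j+1-1 = j by omega]
      have hxor : (2*m) ^^^ ((2*m) &&& (2*m-1)) = 2*(m ^^^ (m &&& (m-1))) := by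
        rw [hland, pv_two_mul_xor]
      have hb := pv_b_pos m h
      rw [hxor, hland, Nat.log2_two_mul hb, ih (m &&& (m-1)) (pv_land_pred_lt m h),
          List.map_cons]

theorem pv_idx_odd (m : Nat) : pvIdxList (2*m+1) = 0 :: pvIdxList (2*m) := by
  rw [pvIdxList]
  simp only [show ¬(2*m+1 = 0) by omega, dif_neg, not_false_iff]
  rw [show 2*m+1-1 = 2*m by omega, pv_odd_land, pv_succ_xor]
  have h1 : Nat.log2 1 = 0 := by decide
  simp [h1]

theorem pv_idx_eq_filter (k : Nat) : ∀ n : Nat, n < 2^k →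
    pvIdxList n = (List.range k).filter n.testBit := by
  induction k with
  | zero =>
    intro n hn
    have : n = 0 := by simpa using hn
    subst this
    rw [pvIdxList]; simp
  | succ k ih =>
    intro n hn
    by_cases h : n = 0
    · subst h; rw [pvIdxList]; simp [Nat.zero_testBit]
    · have hm : n/2 < 2^k := by
        have : (2:Nat)^(k+1) = 2^k * 2 := by ring
        omega
      have hrange : List.range (k+1) = 0 :: (List.range k).map Nat.succ :=
        List.range_succ_eq_map
      have hmapfilter :
          ((List.range k).map Nat.succ).filter n.testBit
            = ((List.range k).filter (n/2).testBit).map Nat.succ := by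
        rw [List.filter_map]
        congr 1
        apply List.filter_congr
        intro i _
        simp [Function.comp, Nat.testBit_succ]
      obtain h2 | h2 : n % 2 = 1 ∨ n % 2 = 0 := by omega
      · have hn' : n = 2*(n/2)+1 := by omega
        have hbit0 : n.testBit 0 = true := by simp [Nat.testBit_zero, h2]
        conv_lhs => rw [hn']
        rw [pv_idx_odd, pv_idx_even, ih (n/2) hm, hrange, List.filter_cons, hbit0,
            hmapfilter]
        simp
      · have hn' : n = 2*(n/2) := by omega
        have hbit0 : n.testBit 0 = false := by simp [Nat.testBit_zero, h2]
        conv_lhs => rw [hn']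
        rw [pv_idx_even, ih (n/2) hm, hrange, List.filter_cons, hbit0, hmapfilter]
        simp

-- A-side bridges ----------------------------------------------------------

theorem pv_band_mask (x : Int) : PySem.Int.band x 65535 = x % 65536 := by
  unfold PySem.Int.band
  by_cases h : (0:Int) ≤ x
  · simp only [h, if_true, show (0:Int) ≤ 65535 by norm_num]
    rw [show ((65535:Int).toNat) = 2^16 - 1 by decide, Nat.and_two_pow_sub_one_eq_mod]
    omega
  · simp only [h, if_false, show (0:Int) ≤ 65535 by norm_num, if_true]
    rw [show ((65535:Int).toNat) = 2^16 - 1 by decide, Nat.land_comm,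
        Nat.and_two_pow_sub_one_eq_mod]
    omega

theorem pv_testBit_div (j : Nat) : ∀ n : Nat, n.testBit j = decide (n / 2^j % 2 = 1) := by
  induction j with
  | zero => intro n; simp [Nat.testBit_zero]
  | succ j ih =>
    intro n
    rw [Nat.testBit_succ, ih (n/2), Nat.div_div_eq_div_mul]
    congr 2
    rw [pow_succ]
    ring_nf

theorem pv_shift_mod (x : Int) (j : Nat) (hj : j < 16) :
    (x / 2^j) % 2 = ((x % 65536) / 2^j) % 2 := by
  have hMpos : (0:Int) < 2^j := by positivity
  have h65536 : (65536:Int) = 2 * 2^(15-j) * 2^j := by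
    rw [← pow_succ', ← pow_add, show 15 - j + 1 + j = 16 by omega]
    norm_num
  set q := x / 65536 with hq
  set r := x % 65536 with hr
  have hsplit : x = r + q * (2 * 2^(15-j)) * 2^j := by
    calc x = r + 65536 * q := by omega
    _ = r + q * (2 * 2^(15-j)) * 2^j := by rw [h65536]; ring
  conv_lhs => rw [hsplit]
  rw [Int.add_mul_ediv_right _ _ (ne_of_gt hMpos)]
  rw [show r / 2^j + q * (2 * 2^(15-j)) = r / 2^j + 2 * (q * 2^(15-j)) by ring,
      Int.add_mul_emod_self_left]

theorem pv_bit_test (x : Int) (j : Nat) (hj : j < 16) :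
    (PySem.Int.band (x >>> ((j : Int))) 1 ≠ 0) ↔ (x % 65536).toNat.testBit j = true := by
  rw [Int.shiftRight_natCast_right, PySem.Int.band_one]
  have hfmod : PySem.Int.mod (x >>> j) 2 = (x >>> j) % 2 := by
    unfold PySem.Int.mod
    rw [Int.fmod_eq_emod]
    simp
  rw [hfmod, Int.shiftRight_eq_div_pow]
  push_cast
  rw [pv_shift_mod x j hj]
  have hr0 : (0:Int) ≤ x % 65536 := Int.emod_nonneg x (by norm_num)
  have hcast : (x % 65536) = ((x % 65536).toNat : Int) := by omega
  rw [hcast, pv_testBit_div j, Int.toNat_natCast]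
  rw [show ((((x % 65536).toNat : Int)) / 2^j % 2) = (((x % 65536).toNat / 2^j % 2 : Nat) : Int) by push_cast; rfl]
  simp only [ne_eq, Int.natCast_eq_zero, decide_eq_true_eq]
  omega

-- assemble both sides -----------------------------------------------------

theorem pv_lists_eq (x : Int) (mm : List (Int × String)) :
    (PySem.List.pyRange 0 16 1).foldl (fun acc bit =>
        if PySem.Int.band (x >>> ((bit.toNat : Int))) 1 ≠ 0 then
          match (PySem.Dict.mk mm).get? bit with
          | some s => acc ++ [s]
          | none   => acc ++ ["Reserved bit " ++ PySem.Int.toStr bit]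
        else acc) []
      = pvLoopB mm (PySem.Int.band x 65535).toNat := by
  -- rewrite A's fold into filter + map
  have hbody : (fun (acc : List String) (bit : Int) =>
        if PySem.Int.band (x >>> ((bit.toNat : Int))) 1 ≠ 0 then
          match (PySem.Dict.mk mm).get? bit with
          | some s => acc ++ [s]
          | none   => acc ++ ["Reserved bit " ++ PySem.Int.toStr bit]
        else acc)
      = (fun acc bit =>
        if (decide (PySem.Int.band (x >>> ((bit.toNat : Int))) 1 ≠ 0)) = true then
          acc ++ [((PySem.Dict.mk mm).getD bit ("Reserved bit " ++ PySem.Int.toStr bit))]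
        else acc) := by
    funext acc bit
    by_cases h : PySem.Int.band (x >>> ((bit.toNat : Int))) 1 ≠ 0
    · rw [if_pos h, if_pos (by simpa using h)]
      rw [PySem.Dict.getD_eq_get?_getD]
      cases (PySem.Dict.mk mm).get? bit <;> rfl
    · rw [if_neg h, if_neg (by simpa using h)]
  rw [hbody, PySem.List.foldl_append_if, List.nil_append]
  -- B's side via the index-list characterization
  set n : Nat := (PySem.Int.band x 65535).toNat with hn
  have hnval : n = (x % 65536).toNat := by rw [hn, pv_band_mask]
  have hnlt : n < 2^16 := by
    have h1 : x % 65536 < 65536 := Int.emod_lt_of_pos x (by norm_num)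
    have h2 : (0:Int) ≤ x % 65536 := Int.emod_nonneg x (by norm_num)
    omega
  rw [pv_loop_eq_map_idx, pv_idx_eq_filter 16 n hnlt]
  -- A's range: pyRange 0 16 1 = (range 16).map cast
  have hrange : PySem.List.pyRange 0 16 1 = (List.range 16).map (fun k : Nat => (k : Int)) := by
    decide
  rw [hrange, List.filter_map, List.map_map]
  -- now both sides are maps of filters over List.range 16
  have hfilter : ∀ i ∈ List.range 16,
      ((fun bit : Int => decide (PySem.Int.band (x >>> ((bit.toNat : Int))) 1 ≠ 0)) ∘ (fun k : Nat => (k : Int))) i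
        = n.testBit i := by
    intro i hi
    have hi16 : i < 16 := List.mem_range.mp hi
    simp only [Function.comp]
    rw [show ((i:Int)).toNat = i by omega]
    rw [hnval]
    cases hb : (x % 65536).toNat.testBit i with
    | false =>
      simp only [decide_eq_false_iff_not]
      intro hP
      have := (pv_bit_test x i hi16).mp hP
      rw [hb] at this
      exact absurd this (by decide)
    | true =>
      simp only [decide_eq_true_eq]
      exact (pv_bit_test x i hi16).mpr hb
  rw [List.filter_congr hfilter]
  rfl

-- ===== VERDICT (by name: the statement is the Claim_ definition above) =====
theorem parse_bitfield_messages_spec : Claim_equal_parse_bitfield_messages := by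
  intro value mm _hdom
  unfold Spec_parse_bitfield_messages parse_bitfield_messages parse_bitfield_messages_alt
  cases value with
  | none => rfl
  | some x =>
    by_cases hx : x = 0
    · simp [hx]
    · simp only [hx, if_false]
      rw [pv_lists_eq x mm]
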